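-- pv_equiv track=rewrite | github.com/BorisKin1957/My_Stepic | cyfry_goda_3.py | triada
-- ===== SOURCE A (Python) =====
-- def triada(year):
--     w = str(year)
--     result = False
--     for i in range(len(w)):
--         if len(w.replace(w[i], ' ').strip()) == 1:
--             result = True
--             break
--
--     return result
-- ===== SOURCE B (Python) =====
-- def triada(year):
--     w = str(year)
--     counts = {}
--     for ch in w:
--         counts[ch] = counts.get(ch, 0) + 1
--     return any(v == len(w) - 1 for v in counts.values())
-- ===== Notes on version B (the rewrite author's own statement) =====
-- stated objective: simpler
-- what changed: A tests each index by rebuilding the string with replace() and strip() and measuring its stripped length; B builds a character-frequency table in one pass and returns whether any distinct character occurs exactly one time fewer than the length of str(year).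
import Mathlib
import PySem

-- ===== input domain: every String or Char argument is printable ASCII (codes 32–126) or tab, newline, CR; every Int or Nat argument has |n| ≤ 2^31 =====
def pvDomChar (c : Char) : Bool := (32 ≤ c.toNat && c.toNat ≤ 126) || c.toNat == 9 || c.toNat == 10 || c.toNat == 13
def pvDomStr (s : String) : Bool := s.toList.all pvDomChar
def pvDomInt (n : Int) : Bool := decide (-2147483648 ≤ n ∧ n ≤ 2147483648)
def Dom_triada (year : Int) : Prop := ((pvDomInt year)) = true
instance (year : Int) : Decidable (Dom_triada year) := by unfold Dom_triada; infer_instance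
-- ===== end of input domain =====

-- B replaces A's per-index replace/strip scanning with a single frequency table
-- (one counting pass over str(year), then a pass over the distinct characters); objective: simpler.

-- ===== PORT A =====
-- the loop body's test: len(w.replace(w[i], ' ').strip()) == 1
def triadaCond (w : List Char) (i : Int) : Bool :=
  (PySem.Chars.strip (PySem.Chars.replace w [PySem.List.pyGetD w i ' '] [' '])).length == 1

-- 'for i in range(len(w)): if …: result = True; break' — early-exit loop over the indices
def triadaLoop (w : List Char) : List Int → Bool
  | [] => false
  | i :: rest => if triadaCond w i then true else triadaLoop w rest

def triada (year : Int) : Bool :=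
  triadaLoop (PySem.Int.toChars year)
    (PySem.List.pyRange 0 ((PySem.Int.toChars year).length : Int) 1)

-- ===== PORT B =====
def triada_alt (year : Int) : Bool :=
  let w := PySem.Int.toChars year
  let counts := w.foldl (fun d ch => d.insert ch (d.getD ch 0 + 1))
    (PySem.Dict.empty : PySem.Dict Char Int)
  counts.values.any (fun v => v == (w.length : Int) - 1)

-- ===== PRECONDITION & SPEC =====
def Spec_triada (year : Int) (out : Bool) : Prop := out = triada_alt year
instance (year : Int) (out : Bool) : Decidable (Spec_triada year out) := by unfold Spec_triada; infer_instance

-- ===== CLAIM (what is proved, stated in full; the proofs are below) =====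
def Claim_equal_triada : Prop := ∀ (year : Int), Dom_triada year → Spec_triada year (triada year)

-- ===== LEMMAS AND PROOFS =====

theorem triadaLoop_eq_any (w : List Char) (l : List Int) :
    triadaLoop w l = l.any (triadaCond w) := by
  induction l with
  | nil => rfl
  | cons i rest ih =>
    by_cases h : triadaCond w i = true <;> simp [triadaLoop, h, ih]

-- str.replace with a single-character pattern is a map over the characters
theorem replace_go_single (c : Char) (l : List Char) (fuel : Nat) (acc : List Char)
    (h : l.length ≤ fuel) :
    PySem.Chars.replace.go [c] [' '] fuel l acc =
      acc.reverse ++ l.map (fun x => if x == c then ' ' else x) := by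
  induction l generalizing fuel acc with
  | nil =>
    cases fuel with
    | zero => simp [PySem.Chars.replace.go]
    | succ f => simp [PySem.Chars.replace.go]
  | cons x t ih =>
    cases fuel with
    | zero => simp at h
    | succ f =>
      simp only [PySem.Chars.replace.go]
      by_cases hx : x = c
      · subst hx
        have hp : [x].isPrefixOf (x :: t) = true := by simp [List.isPrefixOf]
        simp only [hp, if_pos, List.length_cons, List.length_nil, List.drop_succ_cons,
          List.drop_zero]
        rw [ih _ _ (by simpa using h)]
        simp
      · have hp : [c].isPrefixOf (x :: t) = false := by
          simp only [List.isPrefixOf, Bool.and_eq_false_iff]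
          left
          simp [beq_eq_false_iff_ne]
          exact fun h' => absurd h'.symm hx
        simp only [hp, Bool.false_eq_true, if_false]
        rw [ih _ _ (by simpa using h)]
        simp only [List.map_cons, List.reverse_cons, List.append_assoc, List.singleton_append]
        have : (if x == c then ' ' else x) = x := by simp [hx]
        rw [this]

theorem replace_single (s : List Char) (c : Char) :
    PySem.Chars.replace s [c] [' '] = s.map (fun x => if x == c then ' ' else x) := by
  have := replace_go_single c s s.length [] le_rfl
  simpa [PySem.Chars.replace] using this

-- counting non-space characters is invariant under dropWhile isspace …
theorem countP_nonspace_dropWhile (m : List Char) :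
    (List.dropWhile PySem.Chars.isspace m).countP (fun x => !PySem.Chars.isspace x) =
      m.countP (fun x => !PySem.Chars.isspace x) := by
  conv_rhs => rw [← List.takeWhile_append_dropWhile (p := PySem.Chars.isspace) (l := m)]
  rw [List.countP_append]
  have h0 : (m.takeWhile PySem.Chars.isspace).countP (fun x => !PySem.Chars.isspace x) = 0 := by
    rw [List.countP_eq_zero]
    intro a ha
    have := List.mem_takeWhile_imp ha
    simp [this]
  omega

-- … and hence under strip
theorem countP_nonspace_strip (m : List Char) :
    (PySem.Chars.strip m).countP (fun x => !PySem.Chars.isspace x) =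
      m.countP (fun x => !PySem.Chars.isspace x) := by
  rw [PySem.Chars.strip, PySem.Chars.rstrip, List.countP_reverse,
      countP_nonspace_dropWhile, List.countP_reverse, PySem.Chars.lstrip,
      countP_nonspace_dropWhile]

-- strip's result, when nonempty, starts with a non-space character …
theorem strip_head_nonspace (m : List Char) (x : Char) (t : List Char)
    (hs : PySem.Chars.strip m = x :: t) : PySem.Chars.isspace x = false := by
  have hpre : PySem.Chars.strip m <+: PySem.Chars.lstrip m := by
    rw [PySem.Chars.strip, PySem.Chars.rstrip]
    have h1 := List.reverse_prefix.mpr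
      (List.dropWhile_suffix (l := (PySem.Chars.lstrip m).reverse) PySem.Chars.isspace)
    rwa [List.reverse_reverse] at h1
  obtain ⟨t', ht'⟩ := hpre
  have hh : (PySem.Chars.lstrip m).head? = some x := by
    rw [← ht', hs]; rfl
  have := List.head?_dropWhile_not PySem.Chars.isspace m
  rw [show List.dropWhile PySem.Chars.isspace m = PySem.Chars.lstrip m from rfl, hh] at this
  exact this

-- … and ends with one
theorem strip_last_nonspace (m : List Char) (x : Char) (t : List Char)
    (hs : PySem.Chars.strip m = x :: t) :
    PySem.Chars.isspace ((x :: t).getLast (by simp)) = false := by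
  have hrev : (PySem.Chars.strip m).reverse =
      List.dropWhile PySem.Chars.isspace (PySem.Chars.lstrip m).reverse := by
    rw [PySem.Chars.strip, PySem.Chars.rstrip, List.reverse_reverse]
  have hh : (List.dropWhile PySem.Chars.isspace (PySem.Chars.lstrip m).reverse).head? =
      some ((x :: t).getLast (by simp)) := by
    rw [← hrev, List.head?_reverse, hs]
    exact List.getLast?_eq_some_getLast (by simp)
  have := List.head?_dropWhile_not PySem.Chars.isspace (PySem.Chars.lstrip m).reverse
  rw [hh] at this
  exact this

-- len(m.strip()) == 1  ↔  m has exactly one non-space character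
theorem strip_length_one_iff (m : List Char) :
    ((PySem.Chars.strip m).length = 1) ↔
      m.countP (fun x => !PySem.Chars.isspace x) = 1 := by
  constructor
  · intro h1
    rw [← countP_nonspace_strip]
    rcases hs : PySem.Chars.strip m with _ | ⟨x, t⟩
    · rw [hs] at h1; simp at h1
    · have hx := strip_head_nonspace m x t hs
      rw [hs] at h1
      simp at h1
      subst h1
      simp [hx]
  · intro h1
    rw [← countP_nonspace_strip] at h1
    rcases hs : PySem.Chars.strip m with _ | ⟨x, t⟩
    · rw [hs] at h1; simp at h1
    · have hx := strip_head_nonspace m x t hs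
      have hlast := strip_last_nonspace m x t hs
      rw [hs, List.countP_cons] at h1
      simp [hx] at h1
      have ht : t = [] := by
        rcases t with _ | ⟨y, u⟩
        · rfl
        · exfalso
          have hmem : (y :: u).getLast (by simp) ∈ (y :: u) := List.getLast_mem _
          have hsp : PySem.Chars.isspace ((y :: u).getLast (by simp)) = true :=
            h1 _ hmem
          rw [List.getLast_cons (by simp)] at hlast
          rw [hsp] at hlast
          exact absurd hlast (by simp)
      subst ht
      simp
  -- every character of str(year) is a digit or '-': never a space
theorem toChars_nonspace (year : Int) :
    ∀ x ∈ PySem.Int.toChars year, PySem.Chars.isspace x = false := by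
  intro x hx
  have hdig : ∀ {n : Nat}, x ∈ Nat.toDigits 10 n → PySem.Chars.isspace x = false := by
    intro n hn
    have hd := Nat.isDigit_of_mem_toDigits (b := 10) (n := n) (by norm_num) (by norm_num) hn
    simp only [Char.isDigit, decide_eq_true_eq, Bool.and_eq_true] at hd
    have h1 : 48 ≤ x.toNat := hd.1
    have h2 : x.toNat ≤ 57 := hd.2
    simp only [PySem.Chars.isspace]
    simp only [Bool.or_eq_false_iff, Bool.and_eq_false_iff, decide_eq_false_iff_not]
    omega
  rw [PySem.Int.toChars] at hx
  by_cases hy : year < 0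
  · rw [if_pos hy] at hx
    rcases List.mem_cons.mp hx with h | h
    · subst h; decide
    · exact hdig h
  · rw [if_neg hy] at hx
    exact hdig hx

-- the per-character tests of the two programs agree on the characters of str(year)
theorem cond_eq (year : Int) (x : Char) (hx : x ∈ PySem.Int.toChars year) :
    (((PySem.Chars.strip
        (PySem.Chars.replace (PySem.Int.toChars year) [x] [' '])).length == 1) : Bool) =
      (((PySem.Int.toChars year).count x : Int) ==
        ((PySem.Int.toChars year).length : Int) - 1) := by
  set w := PySem.Int.toChars year with hw
  have hns := toChars_nonspace year
  rw [replace_single]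
  have hcount : (w.map (fun y => if y == x then ' ' else y)).countP
      (fun z => !PySem.Chars.isspace z) = w.countP (fun y => !(y == x)) := by
    rw [List.countP_map]
    apply List.countP_congr
    intro a ha
    by_cases hax : a = x
    · subst hax
      simp only [Function.comp, beq_self_eq_true, if_true]
      decide
    · have : PySem.Chars.isspace a = false := hns a (hw ▸ ha)
      simp [Function.comp, hax, this]
  have hlen := List.length_eq_countP_add_countP (l := w) (p := fun y => y == x)
  have hcnt : w.count x = w.countP (fun y => y == x) := rfl
  have hle : w.count x ≤ w.length := List.count_le_length
  have hnotP : w.countP (fun a => decide ¬(a == x) = true) = w.countP (fun y => !(y == x)) := by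
    apply List.countP_congr; intro a _; by_cases h : a = x <;> simp [h]
  rw [hnotP] at hlen
  rw [Bool.eq_iff_iff, beq_iff_eq, beq_iff_eq, strip_length_one_iff, hcount]
  omega

-- ===== VERDICT (by name: the statement is the Claim_ definition above) =====
set_option maxHeartbeats 1000000 in
theorem triada_spec : Claim_equal_triada := by
  intro year _
  unfold Spec_triada triada triada_alt
  dsimp only
  set w := PySem.Int.toChars year with hw
  -- A: early-exit index loop = any over the characters
  rw [triadaLoop_eq_any]
  have key : ∀ (p : Char → Bool),
      (PySem.List.pyRange 0 (w.length : Int) 1).any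
          (fun i => p (PySem.List.pyGetD w i ' ')) = w.any p := by
    intro p
    conv_rhs => rw [← PySem.List.map_pyGetD_pyRange_zero w ' ']
    rw [List.any_map]
    rfl
  have hunfold : triadaCond w = fun i =>
      (fun c => ((PySem.Chars.strip (PySem.Chars.replace w [c] [' '])).length == 1))
        (PySem.List.pyGetD w i ' ') := rfl
  rw [hunfold,
    key (fun c => ((PySem.Chars.strip (PySem.Chars.replace w [c] [' '])).length == 1))]
  -- B: the counting loop is Counter(w); its values are the counts of the distinct chars
  rw [PySem.Dict.foldl_insert_getD_add_one_eq_counter]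
  have hvals : (PySem.Dict.counter w).values =
      (PySem.Set.ofList w).map (fun k => ((w.count k : Int))) := by
    show (PySem.Dict.counter w).items.map (·.2) = _
    rw [PySem.Dict.items_counter]
    simp
  rw [hvals, List.any_map]
  -- both sides test the same predicate over the same set of characters
  rw [Bool.eq_iff_iff]
  simp only [List.any_eq_true, PySem.Set.mem_ofList, Function.comp]
  constructor
  · rintro ⟨c, hc, hp⟩
    exact ⟨c, hc, by rw [← cond_eq year c (hw ▸ hc)]; exact hp⟩
  · rintro ⟨c, hc, hp⟩
    exact ⟨c, hc, by rw [cond_eq year c (hw ▸ hc)]; exact hp⟩
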